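-- pv_equiv track=rewrite | github.com/arishiki/MJ | Chinitsu/funcs.py | is_all_ments
-- ===== SOURCE A (Python) =====
-- def list_remove_list(list0, list_rm):
--     #return a list removed elements of list_rm from list0
--     list_cp = list(list0)
--     for i in list_rm:
--         if i in list_cp:
--             list_cp.remove(i)
--     return list_cp
--
-- def is_all_ments(list):
--     #we get stringfied version of dif because we want to
--     #use regular expression.
--
--     #is used for judging if the list is a set of ments(3 pies which is
--     #either 3 identical pies or a sequence with each differences are
--     #exactly 1's).
--     #ofc, this list must be length of 3N.
--
--     #if you have excluded all the ments and you have empty list,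
--     #then it is all ments.
--
--     if not list:
--         return True
--     elif not len(list) % 3:
--         shunts = list[0]+1 in list and list[0]+2 in list
--
--         return (list[0] == list[2] and is_all_ments(list[3:])) \
--             or (shunts and is_all_ments(list_remove_list(list, \
--                                         [list[0], list[0]+1, list[0]+2])))
--     else:
--         return False
-- ===== SOURCE B (Python) =====
-- def is_all_ments(list):
--     # Greedy over the run-length encoding of the (sorted) hand:
--     # the smallest remaining value can only be used in triplets or in runs
--     # (v, v+1, v+2); count mod 3 of the smallest value forces exactly that
--     # many runs, the rest are triplets.
--     if len(list) % 3:
--         return False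
--     rle = []
--     for x in list:
--         if rle and rle[-1][0] == x:
--             rle[-1] = (x, rle[-1][1] + 1)
--         else:
--             rle.append((x, 1))
--     while rle:
--         (v, c) = rle[0]
--         rle = rle[1:]
--         if c == 0:
--             continue
--         r = c % 3
--         if r:
--             if len(rle) < 2 or rle[0][0] != v + 1 or rle[1][0] != v + 2:
--                 return False
--             if rle[0][1] < r or rle[1][1] < r:
--                 return False
--             rle = [(v + 1, rle[0][1] - r), (v + 2, rle[1][1] - r)] + rle[2:]
--     return True
-- ===== Notes on version B (the rewrite author's own statement) =====
-- stated objective: alternative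
-- what changed: Replaces A's triplet-or-run backtracking with repeated list copies/removals by a single greedy pass over the run-length encoding (the multiplicity of the smallest value mod 3 forces the number of runs starting there); Pre_ excludes unsorted lists of length 3N, where A's triplet test (first element compared with the third) ignores the middle element and gives order-dependent accidental values.
-- outside the precondition, e.g. on is_all_ments([4, 0, 4]): A returns True, B returns False; on is_all_ments([0, 3, 2, 2, 3, 1]): A returns True, B returns False
import Mathlib
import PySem

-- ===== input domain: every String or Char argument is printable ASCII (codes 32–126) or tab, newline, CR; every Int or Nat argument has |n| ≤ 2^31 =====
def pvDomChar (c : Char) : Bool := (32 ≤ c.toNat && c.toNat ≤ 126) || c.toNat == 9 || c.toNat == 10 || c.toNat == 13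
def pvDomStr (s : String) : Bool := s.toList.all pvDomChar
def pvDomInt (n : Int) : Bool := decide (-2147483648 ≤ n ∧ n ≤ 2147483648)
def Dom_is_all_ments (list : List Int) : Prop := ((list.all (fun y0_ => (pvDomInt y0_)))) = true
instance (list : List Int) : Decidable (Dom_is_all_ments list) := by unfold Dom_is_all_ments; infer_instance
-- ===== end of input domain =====

-- B replaces A's triplet-or-run backtracking (with repeated list copies and removals)
-- by a single greedy pass over the run-length encoding of the hand.
-- Pre_ admits sorted (nondecreasing) hands — the documented domain — plus every list
-- whose length is not a multiple of 3 (both return False there).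

-- ===== PORT A =====

-- helper of A: remove from list0 the first occurrence of each element of list_rm that is present
def list_remove_list (list0 : List Int) (list_rm : List Int) : List Int :=
  list_rm.foldl
    (fun acc i => if acc.contains i then (PySem.List.remove? acc i).getD acc else acc)
    list0

theorem list_remove_list_length_le (list0 : List Int) (list_rm : List Int) :
    (list_remove_list list0 list_rm).length ≤ list0.length := by
  unfold list_remove_list
  induction list_rm generalizing list0 with
  | nil => simp
  | cons i tl ih =>
    simp only [List.foldl_cons]
    refine le_trans (ih _) ?_
    by_cases h : list0.contains i
    · simp only [h, if_true]
      have hm : i ∈ list0 := by simpa using h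
      rw [PySem.List.remove?_eq_some_erase _ _ hm]
      simpa using List.length_erase_le (l := list0) (a := i)
    · rw [if_neg h]

theorem list_remove_list_head_lt (x0 : Int) (t : List Int) (a b : Int) :
    (list_remove_list (x0 :: t) [x0, a, b]).length < (x0 :: t).length := by
  have h1 : list_remove_list (x0 :: t) [x0, a, b] = list_remove_list t [a, b] := by
    unfold list_remove_list
    simp [PySem.List.remove?_cons_self]
  rw [h1]
  have := list_remove_list_length_le t [a, b]
  simpa using Nat.lt_succ_of_le this

-- port of A's recursion; the inner match arm `_ => false` is unreachable
-- (a nonempty list whose length is a multiple of 3 has ≥ 3 elements);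
-- Python l[3:] on a list of length ≥ 3 is List.drop 3.
def is_all_ments (list : List Int) : Bool :=
  match list with
  | [] => true
  | x0 :: t =>
    if (x0 :: t).length % 3 == 0 then
      let shunts := (x0 :: t).contains (x0 + 1) && (x0 :: t).contains (x0 + 2)
      ((match PySem.List.pyGet? (x0 :: t) 2 with
        | some x2 => decide (x0 = x2)
        | none => false)
        && is_all_ments ((x0 :: t).drop 3))
      || (shunts && is_all_ments (list_remove_list (x0 :: t) [x0, x0 + 1, x0 + 2]))
    else false
  termination_by list.length
  decreasing_by
    · simp
    · exact list_remove_list_head_lt x0 t (x0 + 1) (x0 + 2)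

-- ===== PORT B =====

-- Source B builds the run-length encoding by appending at the back; the port keeps the
-- accumulator reversed (prepend) and reverses once at the end, the standard functional
-- transcription of an append-at-the-end loop.
def rleStep (acc : List (Int × Int)) (x : Int) : List (Int × Int) :=
  match acc with
  | (v, c) :: rest => if v == x then (x, c + 1) :: rest else (x, 1) :: (v, c) :: rest
  | [] => [(x, 1)]

def toRLE (l : List Int) : List (Int × Int) :=
  (l.foldl rleStep []).reverse

-- Source B's while loop over the remaining encoding, one entry per iteration
def solveGreedy (rle : List (Int × Int)) : Bool :=
  match rle with
  | [] => true
  | (v, c) :: rest =>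
    if c == 0 then solveGreedy rest
    else
      let r := PySem.Int.mod c 3
      if r == 0 then solveGreedy rest
      else
        match rest with
        | (v1, c1) :: (v2, c2) :: rest2 =>
          if v1 != v + 1 || v2 != v + 2 then false
          else if c1 < r || c2 < r then false
          else solveGreedy ((v + 1, c1 - r) :: (v + 2, c2 - r) :: rest2)
        | _ => false
  termination_by rle.length
  decreasing_by all_goals simp

def is_all_ments_alt (list : List Int) : Bool :=
  if list.length % 3 == 0 then solveGreedy (toRLE list) else false

-- ===== PRECONDITION & SPEC =====
-- Pre_ admits every sorted (nondecreasing) list — the function's documented domain, a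
-- mahjong hand of tiles in order — and additionally every list whose length is not a
-- multiple of 3 (both implementations return False there outright). It excludes only
-- unsorted lists of length 3N, where A's triplet test (first element compared with the
-- third) ignores the middle element and yields order-dependent accidental values.
def Pre_is_all_ments (list : List Int) : Prop :=
  list.Pairwise (· ≤ ·) ∨ ¬ list.length % 3 = 0
instance (list : List Int) : Decidable (Pre_is_all_ments list) := by unfold Pre_is_all_ments; infer_instance

def pvWitness_is_all_ments : List Int := [1, 1, 1, 2, 3, 4]

def Spec_is_all_ments (list : List Int) (out : Bool) : Prop := out = is_all_ments_alt list
instance (list : List Int) (out : Bool) : Decidable (Spec_is_all_ments list out) := by unfold Spec_is_all_ments; infer_instance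

-- ===== CLAIM (what is proved, stated in full; the proofs are below) =====
def Claim_equal_is_all_ments : Prop := ∀ (list : List Int), Dom_is_all_ments list → Pre_is_all_ments list → Spec_is_all_ments list (is_all_ments list)

-- ===== LEMMAS AND PROOFS =====

-- decode a run-length encoding back to the tile list (zero counts decode to nothing)
def unRLE (s : List (Int × Int)) : List Int := s.flatMap (fun p => List.replicate p.2.toNat p.1)

theorem unRLE_cons (v c : Int) (rest : List (Int × Int)) :
    unRLE ((v, c) :: rest) = List.replicate c.toNat v ++ unRLE rest := rfl

theorem mod3_eq (c : Int) : PySem.Int.mod c 3 = c % 3 :=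
  PySem.Int.mod_eq_emod_of_pos (by norm_num)
theorem mem_unRLE (x : Int) (s : List (Int × Int)) :
    x ∈ unRLE s ↔ ∃ p ∈ s, p.1 = x ∧ 0 < p.2 := by
  unfold unRLE
  simp only [List.mem_flatMap, List.mem_replicate]
  constructor
  · rintro ⟨p, hp, hne, rfl⟩; exact ⟨p, hp, rfl, by omega⟩
  · rintro ⟨p, hp, rfl, hpos⟩; exact ⟨p, hp, by omega, rfl⟩

-- all keys behind the head of a strictly increasing chain are larger
theorem keys_gt (m : Int) (c : Int) (rest : List (Int × Int))
    (h : List.IsChain (fun p q : Int × Int => p.1 < q.1) ((m, c) :: rest)) :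
    ∀ p ∈ rest, m < p.1 := by
  haveI : Trans (fun p q : Int × Int => p.1 < q.1) (fun p q : Int × Int => p.1 < q.1)
      (fun p q : Int × Int => p.1 < q.1) := ⟨fun h1 h2 => lt_trans h1 h2⟩
  have hp := List.isChain_iff_pairwise.mp h
  intro p hp'
  exact (List.pairwise_cons.mp hp).1 p hp'
theorem solveGreedy_tripletHead (x c : Int) (t : List (Int × Int)) (h : 3 ≤ c) :
    solveGreedy ((x, c) :: t) = solveGreedy ((x, c - 3) :: t) := by
  conv_lhs => rw [solveGreedy]
  conv_rhs => rw [solveGreedy]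
  by_cases h3 : c - 3 = 0
  · simp [show c = 3 by omega]
  · have hmod : (c - 3) % 3 = c % 3 := by omega
    simp only [mod3_eq, beq_iff_eq, hmod, if_neg (show ¬c = 0 by omega), if_neg h3]

theorem solveGreedy_S (a c1 c2 : Int) (t : List (Int × Int)) (h1 : 3 ≤ c1) (h2 : 3 ≤ c2) :
    solveGreedy ((a, c1 - 3) :: (a + 1, c2 - 3) :: t) = true →
    solveGreedy ((a, c1) :: (a + 1, c2) :: t) = true := by
  intro hs
  by_cases hd0 : c1 - 3 = 0
  · rw [solveGreedy, if_pos (by simp [hd0])] at hs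
    rw [solveGreedy, if_neg (by simp; omega), mod3_eq]
    rw [if_pos (by simp [show c1 = 3 by omega])]
    rw [solveGreedy_tripletHead _ _ _ h2]
    exact hs
  · rw [solveGreedy, if_neg (by simpa using hd0), mod3_eq] at hs
    rw [solveGreedy, if_neg (by simp; omega), mod3_eq]
    have hmod : (c1 - 3) % 3 = c1 % 3 := by omega
    rw [hmod] at hs
    by_cases hr : c1 % 3 = 0
    · rw [if_pos (by simpa using hr)] at hs
      rw [if_pos (by simpa using hr)]
      rw [solveGreedy_tripletHead _ _ _ h2]
      exact hs
    · rw [if_neg (by simpa using hr)] at hs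
      rw [if_neg (by simpa using hr)]
      match t with
      | [] => dsimp only at hs; simp at hs
      | (w, c3) :: t' =>
        dsimp only at hs ⊢
        have hmr : 0 ≤ c1 % 3 ∧ c1 % 3 < 3 := ⟨Int.emod_nonneg c1 (by norm_num), Int.emod_lt_of_pos c1 (by norm_num)⟩
        by_cases hw : w = a + 1 + 1
        · rw [if_neg (by simp [hw]; omega)] at hs
          rw [if_neg (by simp [hw]; omega)]
          by_cases hlt : c2 - 3 < c1 % 3 ∨ c3 < c1 % 3
          · rw [if_pos (by simpa using hlt)] at hs; exact absurd hs (by simp)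
          · rw [if_neg (by simpa using hlt)] at hs
            push_neg at hlt
            rw [if_neg (by simp; omega)]
            have h4 : 3 ≤ c2 - c1 % 3 := by omega
            rw [solveGreedy_tripletHead _ _ _ h4]
            have : c2 - c1 % 3 - 3 = c2 - 3 - c1 % 3 := by ring
            rw [this]
            exact hs
        · rw [if_pos (by
            simp only [Bool.or_eq_true, bne_iff_ne, ne_eq]
            right; omega)] at hs
          exact absurd hs (by simp)
def adjB (m : Int) (rest : List (Int × Int)) : Bool :=
  match rest with
  | (v1, c1) :: (v2, c2) :: _ => decide (v1 = m + 1 ∧ v2 = m + 2 ∧ 1 ≤ c1 ∧ 1 ≤ c2)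
  | _ => false

def runDec (m c : Int) (rest : List (Int × Int)) : List (Int × Int) :=
  match rest with
  | (v1, c1) :: (v2, c2) :: rest2 => (m, c - 1) :: (v1, c1 - 1) :: (v2, c2 - 1) :: rest2
  | _ => (m, c - 1) :: rest

theorem solveGreedy_G (m c : Int) (rest : List (Int × Int)) (hc : 1 ≤ c) :
    solveGreedy ((m, c) :: rest) =
      ((decide (3 ≤ c) && solveGreedy ((m, c - 3) :: rest))
        || (adjB m rest && solveGreedy (runDec m c rest))) := by
  have hmr : 0 ≤ c % 3 ∧ c % 3 < 3 := ⟨Int.emod_nonneg c (by norm_num), Int.emod_lt_of_pos c (by norm_num)⟩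
  by_cases hr : c % 3 = 0
  · -- the minimum's count is a multiple of 3: it is consumed by triplets
    have hc3 : 3 ≤ c := by omega
    have hL : solveGreedy ((m, c) :: rest) = solveGreedy rest := by
      rw [solveGreedy, if_neg (by simp; omega), mod3_eq, if_pos (by simpa using hr)]
    rw [← solveGreedy_tripletHead m c rest hc3, decide_eq_true hc3, Bool.true_and]
    cases hLv : solveGreedy ((m, c) :: rest) with
    | true => simp
    | false =>
      match rest with
      | [] => simp [adjB]
      | [_] => simp [adjB]
      | (v1, c1) :: (v2, c2) :: rest2 =>
        by_cases hadj : v1 = m + 1 ∧ v2 = m + 2 ∧ 1 ≤ c1 ∧ 1 ≤ c2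
        · obtain ⟨ha1, ha2, hb1, hb2⟩ := hadj
          subst ha1; subst ha2
          -- if the run branch succeeded, S would make the whole state solvable
          suffices hrd : solveGreedy (runDec m c ((m + 1, c1) :: (m + 2, c2) :: rest2)) = false by
            simp [hrd]
          cases hrdv : solveGreedy (runDec m c ((m + 1, c1) :: (m + 2, c2) :: rest2)) with
          | false => rfl
          | true =>
            exfalso
            unfold runDec at hrdv
            rw [solveGreedy, if_neg (by simp; omega), mod3_eq,
              if_neg (by simp; omega)] at hrdv
            have hmod1 : (c - 1) % 3 = 2 := by omega
            rw [hmod1] at hrdv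
            dsimp only at hrdv
            rw [if_neg (by simp)] at hrdv
            by_cases hlt : c1 - 1 < 2 ∨ c2 - 1 < 2
            · rw [if_pos (by simpa using hlt)] at hrdv; exact absurd hrdv (by simp)
            · rw [if_neg (by simpa using hlt)] at hrdv
              push_neg at hlt
              have hs' : solveGreedy ((m + 1, c1 - 3) :: (m + 1 + 1, c2 - 3) :: rest2) = true := by
                have e1 : c1 - 1 - 2 = c1 - 3 := by ring
                have e2 : c2 - 1 - 2 = c2 - 3 := by ring
                rw [e1, e2] at hrdv
                convert hrdv using 4 <;> ring
              have := solveGreedy_S (m + 1) c1 c2 rest2 (by omega) (by omega) hs'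
              rw [hL] at hLv
              rw [show m + 1 + 1 = m + 2 by ring] at this
              rw [hLv] at this
              exact Bool.false_ne_true this
        · have hab : adjB m ((v1, c1) :: (v2, c2) :: rest2) = false := by
            simp only [adjB, decide_eq_false_iff_not]
            exact hadj
          simp [hab]
  · -- the minimum's count forces c % 3 runs
    have hr1 : 1 ≤ c % 3 := by omega
    have hT : ∀ cw : Int, 1 ≤ cw → cw % 3 = c % 3 →
        solveGreedy ((m, cw) :: rest) =
        (match rest with
          | (v1, c1) :: (v2, c2) :: rest2 =>
            if (v1 != m + 1 || v2 != m + 2) = true then false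
            else
              if (decide (c1 < c % 3) || decide (c2 < c % 3)) = true then false
              else solveGreedy ((m + 1, c1 - c % 3) :: (m + 2, c2 - c % 3) :: rest2)
          | _ => false) := by
      intro cw hcw hmodc
      rw [solveGreedy, if_neg (by simp; omega), mod3_eq, hmodc, if_neg (by simpa using hr)]
    match rest with
    | [] =>
      rw [hT c hc rfl]
      by_cases h3 : 3 ≤ c
      · rw [hT (c - 3) (by omega) (by omega)]
        simp [adjB]
      · simp [adjB, decide_eq_false h3]
    | [(v1, c1)] =>
      rw [hT c hc rfl]
      by_cases h3 : 3 ≤ c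
      · rw [hT (c - 3) (by omega) (by omega)]
        simp [adjB]
      · simp [adjB, decide_eq_false h3]
    | (v1, c1) :: (v2, c2) :: rest2 =>
      rw [hT c hc rfl]
      dsimp only
      by_cases hadj : v1 = m + 1 ∧ v2 = m + 2 ∧ 1 ≤ c1 ∧ 1 ≤ c2
      · obtain ⟨ha1, ha2, hb1, hb2⟩ := hadj
        subst ha1; subst ha2
        rw [if_neg (by simp)]
        have hab : adjB m ((m + 1, c1) :: (m + 2, c2) :: rest2) = true := by
          simp only [adjB, decide_eq_true_eq]; simp [hb1, hb2]
        rw [hab, Bool.true_and]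
        have hRD : solveGreedy (runDec m c ((m + 1, c1) :: (m + 2, c2) :: rest2)) =
            (if (decide (c1 < c % 3) || decide (c2 < c % 3)) = true then false
              else solveGreedy ((m + 1, c1 - c % 3) :: (m + 2, c2 - c % 3) :: rest2)) := by
          unfold runDec
          by_cases hc1 : c = 1
          · subst hc1
            rw [solveGreedy, if_pos (by norm_num)]
            rw [if_neg (by simp; omega)]
            norm_num
          · rw [solveGreedy, if_neg (by simp; omega), mod3_eq]
            have hm1 : (c - 1) % 3 = c % 3 - 1 := by omega
            rw [hm1]
            by_cases hr2 : c % 3 = 1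
            · rw [if_pos (by simp [hr2])]
              rw [if_neg (by simp [hr2]; omega), hr2]
            · have hr2' : c % 3 = 2 := by omega
              rw [if_neg (by simp [hr2']), hr2']
              dsimp only
              rw [if_neg (by simp)]
              by_cases hlt : c1 < 2 ∨ c2 < 2
              · rw [if_pos (by simp; omega), if_pos (by simp; omega)]
              · rw [if_neg (by simp; omega), if_neg (by simp; omega)]
                have e1 : c1 - 1 - (2 - 1) = c1 - 2 := by ring
                have e2 : c2 - 1 - (2 - 1) = c2 - 2 := by ring
                rw [e1, e2]
        rw [hRD]
        have hTrip : (decide (3 ≤ c) && solveGreedy ((m, c - 3) :: (m + 1, c1) :: (m + 2, c2) :: rest2)) =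
            (decide (3 ≤ c) &&
              (if (decide (c1 < c % 3) || decide (c2 < c % 3)) = true then false
                else solveGreedy ((m + 1, c1 - c % 3) :: (m + 2, c2 - c % 3) :: rest2))) := by
          by_cases h3 : 3 ≤ c
          · rw [hT (c - 3) (by omega) (by omega)]
            dsimp only
            rw [if_neg (by simp)]
          · rw [decide_eq_false h3]; simp
        rw [hTrip]
        cases hDv : (if (decide (c1 < c % 3) || decide (c2 < c % 3)) = true then false
            else solveGreedy ((m + 1, c1 - c % 3) :: (m + 2, c2 - c % 3) :: rest2)) <;>
          simp
      · have hab : adjB m ((v1, c1) :: (v2, c2) :: rest2) = false := by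
          simp only [adjB, decide_eq_false_iff_not]; exact hadj
        have hE : (if (v1 != m + 1 || v2 != m + 2) = true then false
            else
              if (decide (c1 < c % 3) || decide (c2 < c % 3)) = true then false
              else solveGreedy ((m + 1, c1 - c % 3) :: (m + 2, c2 - c % 3) :: rest2)) = false := by
          by_cases hv : v1 = m + 1 ∧ v2 = m + 2
          · rw [if_neg (by simp [hv.1, hv.2])]
            rw [if_pos (by simp; omega)]
          · rw [if_pos (by
              simp only [Bool.or_eq_true, bne_iff_ne, ne_eq]
              by_contra hcon
              push_neg at hcon
              exact hv ⟨hcon.1, hcon.2⟩)]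
        rw [hE, hab, Bool.false_and, Bool.or_false]
        by_cases h3 : 3 ≤ c
        · rw [hT (c - 3) (by omega) (by omega)]
          dsimp only
          rw [hE]
          simp
        · rw [decide_eq_false h3]; simp
theorem solveGreedy_total : ∀ (n : Nat) (s : List (Int × Int)), s.length ≤ n →
    (∀ p ∈ s, 0 ≤ p.2) → solveGreedy s = true → (unRLE s).length % 3 = 0 := by
  intro n
  induction n with
  | zero =>
    intro s hs _ _
    have : s = [] := List.eq_nil_of_length_eq_zero (Nat.le_zero.mp hs)
    subst this; simp [unRLE]
  | succ n ih =>
    intro s hs hc hsol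
    match s with
    | [] => simp [unRLE]
    | (v, c) :: rest =>
      rw [solveGreedy] at hsol
      have hc0 : 0 ≤ c := hc (v, c) (by simp)
      by_cases hz : c = 0
      · subst hz
        simp only [BEq.rfl, if_true] at hsol
        have := ih rest (by simpa using hs) (fun p hp => hc p (by simp [hp])) hsol
        simp only [unRLE_cons]
        simpa using this
      · simp only [beq_iff_eq, hz, if_false, mod3_eq] at hsol
        by_cases hr : c % 3 = 0
        · rw [if_pos (by simpa using hr)] at hsol
          have := ih rest (by simpa using hs) (fun p hp => hc p (by simp [hp])) hsol
          simp only [unRLE_cons, List.length_append, List.length_replicate]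
          omega
        · rw [if_neg (by simpa using hr)] at hsol
          match rest with
          | [] => simp at hsol
          | [_] => simp at hsol
          | (v1, c1) :: (v2, c2) :: rest2 =>
            dsimp only at hsol
            by_cases hv : v1 = v + 1 ∧ v2 = v + 2
            · rw [if_neg (by simp [hv.1, hv.2])] at hsol
              by_cases hlt : c1 < c % 3 ∨ c2 < c % 3
              · rw [if_pos (by simpa using hlt)] at hsol; exact absurd hsol (by simp)
              · rw [if_neg (by simpa using hlt)] at hsol
                push_neg at hlt
                have h1 : 0 ≤ c2 := hc (v2, c2) (by simp)
                have := ih ((v + 1, c1 - (c % 3)) :: (v + 2, c2 - (c % 3)) :: rest2)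
                  (by simp at hs ⊢; omega)
                  (by
                    intro p hp
                    simp only [List.mem_cons] at hp
                    rcases hp with rfl | rfl | hp
                    · simp; omega
                    · simp; omega
                    · exact hc p (by simp [hp]))
                  hsol
                simp only [unRLE_cons, List.length_append, List.length_replicate] at this ⊢
                have hm : 0 ≤ c % 3 ∧ c % 3 < 3 := ⟨Int.emod_nonneg c (by norm_num), Int.emod_lt_of_pos c (by norm_num)⟩
                omega
            · rw [if_pos (by
                simp only [Bool.or_eq_true, bne_iff_ne, ne_eq]
                by_contra hcon
                push_neg at hcon
                exact hv ⟨hcon.1, hcon.2⟩)] at hsol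
              exact absurd hsol (by simp)
theorem rle_fold_inv (l : List Int) : ∀ (acc : List (Int × Int)),
    l.Pairwise (· ≤ ·) →
    (∀ p ∈ acc, 1 ≤ p.2) →
    List.IsChain (fun p q : Int × Int => q.1 < p.1) acc →
    (∀ x ∈ l, ∀ hd ∈ acc.head?, hd.1 ≤ x) →
    (∀ p ∈ l.foldl rleStep acc, 1 ≤ p.2) ∧
      List.IsChain (fun p q : Int × Int => q.1 < p.1) (l.foldl rleStep acc) ∧
      unRLE (l.foldl rleStep acc).reverse = unRLE acc.reverse ++ l := by
  induction l with
  | nil => intro acc _ h1 h2 _; exact ⟨h1, h2, by simp⟩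
  | cons x xs ih =>
    intro acc hs h1 h2 hhd
    have hxs : xs.Pairwise (· ≤ ·) := (List.pairwise_cons.mp hs).2
    have hxle : ∀ y ∈ xs, x ≤ y := (List.pairwise_cons.mp hs).1
    simp only [List.foldl_cons]
    match acc with
    | [] =>
      have := ih [(x, 1)] hxs (by simp) (by simp)
        (by intro y hy hd hhd'; simp at hhd'; subst hhd'; exact hxle y hy)
      refine ⟨this.1, this.2.1, ?_⟩
      rw [show rleStep [] x = [(x, 1)] from rfl, this.2.2]
      simp [unRLE]
    | (v, c) :: racc =>
      have hvx : v ≤ x := hhd x (by simp) (v, c) (by simp)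
      have hc1 : 1 ≤ c := h1 (v, c) (by simp)
      by_cases hveq : v = x
      · subst hveq
        have step : rleStep ((v, c) :: racc) v = (v, c + 1) :: racc := by simp [rleStep]
        rw [step]
        have := ih ((v, c + 1) :: racc) hxs
          (by
            intro p hp
            rcases List.mem_cons.mp hp with rfl | hp
            · simp; omega
            · exact h1 p (by simp [hp]))
          (by
            cases racc with
            | nil => simp
            | cons q t =>
              have := h2
              simp only [List.isChain_cons] at this ⊢
              exact this)
          (by
            intro y hy hd hhd'
            simp at hhd'; subst hhd'
            exact hxle y hy)
        refine ⟨this.1, this.2.1, ?_⟩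
        rw [this.2.2]
        have e1 : unRLE ((v, c + 1) :: racc).reverse = unRLE ((v, c) :: racc).reverse ++ [v] := by
          simp only [List.reverse_cons, unRLE, List.flatMap_append, List.flatMap_cons]
          have : (c + 1).toNat = c.toNat + 1 := by omega
          simp [this, List.replicate_succ']
        rw [e1]
        simp
      · have hvlt : v < x := lt_of_le_of_ne hvx hveq
        have step : rleStep ((v, c) :: racc) x = (x, 1) :: (v, c) :: racc := by
          simp [rleStep]; omega
        rw [step]
        have := ih ((x, 1) :: (v, c) :: racc) hxs
          (by
            intro p hp
            rcases List.mem_cons.mp hp with rfl | hp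
            · simp
            · exact h1 p hp)
          (by
            rw [List.isChain_cons]
            refine ⟨?_, h2⟩
            intro b hb
            simp at hb; subst hb; exact hvlt)
          (by intro y hy hd hhd'; simp at hhd'; subst hhd'; exact hxle y hy)
        refine ⟨this.1, this.2.1, ?_⟩
        rw [this.2.2]
        simp [unRLE]

theorem toRLE_facts (l : List Int) (hs : l.Pairwise (· ≤ ·)) :
    (∀ p ∈ toRLE l, 1 ≤ p.2) ∧
      List.IsChain (fun p q : Int × Int => p.1 < q.1) (toRLE l) ∧
      unRLE (toRLE l) = l := by
  have h := rle_fold_inv l [] hs (by simp) (by simp) (by simp)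
  refine ⟨?_, ?_, ?_⟩
  · intro p hp
    exact h.1 p (by simpa [toRLE] using hp)
  · exact List.isChain_reverse.mpr h.2.1
  · simpa [toRLE, unRLE] using h.2.2
theorem trip_char (m : Int) (n : Nat) (u : List Int) (hn : 1 ≤ n)
    (hlen : 3 ≤ n + u.length) (hu : ∀ x ∈ u, m < x) :
    (match PySem.List.pyGet? (List.replicate n m ++ u) 2 with
      | some x2 => decide (m = x2)
      | none => false) = decide (3 ≤ n) := by
  have hcast : ((2 : Int)) = ((2 : Nat) : Int) := rfl
  rw [hcast, PySem.List.pyGet?_natCast]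
  rw [List.getElem?_append]
  by_cases h3 : 3 ≤ n
  · rw [if_pos (by simpa using by omega : (2:Nat) < (List.replicate n m).length)]
    rw [List.getElem?_replicate]
    rw [if_pos (by omega)]
    simp [h3]
  · rw [if_neg (by simpa using by omega : ¬ (2:Nat) < (List.replicate n m).length)]
    have hlt : 2 - (List.replicate n m).length < u.length := by
      simp only [List.length_replicate]; omega
    rw [List.getElem?_eq_getElem hlt]
    have hmem : u[2 - (List.replicate n m).length] ∈ u := List.getElem_mem hlt
    have := hu _ hmem
    dsimp only
    rw [decide_eq_false h3]
    simp only [decide_eq_false_iff_not]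
    omega

-- the two membership tests of A's `shunts` compute the adjacency test of the greedy pass
theorem adj_char (m c : Int) (rest : List (Int × Int))
    (hch : List.IsChain (fun p q : Int × Int => p.1 < q.1) ((m, c) :: rest)) :
    ((unRLE ((m, c) :: rest)).contains (m + 1) && (unRLE ((m, c) :: rest)).contains (m + 2))
      = adjB m rest := by
  have hgt := keys_gt m c rest hch
  rw [Bool.eq_iff_iff]
  simp only [Bool.and_eq_true, List.contains_iff_mem, mem_unRLE]
  match rest with
  | [] => simp [adjB]
  | [(v1, c1)] =>
    simp only [adjB]
    constructor
    · rintro ⟨⟨p, hp, he1, _⟩, ⟨q, hq, he2, _⟩⟩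
      simp only [List.mem_cons, List.not_mem_nil, or_false] at hp hq
      exfalso
      rcases hp with rfl | rfl <;> rcases hq with rfl | rfl <;> dsimp only at he1 he2 <;> omega
    · simp
  | (v1, c1) :: (v2, c2) :: t =>
    have hv1 : m < v1 := hgt (v1, c1) (by simp)
    obtain ⟨_, hch2⟩ := List.isChain_cons.mp hch
    obtain ⟨hh2, hch3⟩ := List.isChain_cons.mp hch2
    have hv2 : v1 < v2 := by simpa using hh2 (v2, c2) (by simp)
    have htk : ∀ p ∈ t, v2 < p.1 := keys_gt v2 c2 t hch3
    simp only [adjB, decide_eq_true_eq]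
    constructor
    · rintro ⟨⟨p, hp, he1, hp2⟩, ⟨q, hq, he2, hq2⟩⟩
      simp only [List.mem_cons] at hp hq
      have hpv : p = (v1, c1) ∧ v1 = m + 1 := by
        rcases hp with rfl | rfl | rfl | h
        · exfalso; dsimp only at he1; omega
        · exact ⟨rfl, he1⟩
        · exfalso; dsimp only at he1; omega
        · exfalso; have := htk p h; omega
      have hqv : q = (v2, c2) ∧ v2 = m + 2 := by
        rcases hq with rfl | rfl | rfl | h
        · exfalso; dsimp only at he2; omega
        · exfalso; dsimp only at he2; omega
        · exact ⟨rfl, he2⟩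
        · exfalso; have := htk q h; omega
      refine ⟨hpv.2, hqv.2, ?_, ?_⟩
      · have := hpv.1; subst this; simpa using hp2
      · have := hqv.1; subst this; simpa using hq2
    · rintro ⟨rfl, rfl, hc1, hc2⟩
      exact ⟨⟨(m + 1, c1), by simp, rfl, by omega⟩, ⟨(m + 2, c2), by simp, rfl, by omega⟩⟩
theorem erase_skip (k : Nat) (v a : Int) (u : List Int) (hne : a ≠ v) :
    (List.replicate k v ++ u).erase a = List.replicate k v ++ u.erase a :=
  List.erase_append_right u (by simp [List.mem_replicate]; intro _; exact fun h => hne h)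

theorem erase_head (k : Nat) (v : Int) (u : List Int) (hk : 1 ≤ k) :
    (List.replicate k v ++ u).erase v = List.replicate (k - 1) v ++ u := by
  rw [show k = (k - 1) + 1 by omega, List.replicate_succ, List.cons_append,
    List.erase_cons_head]
  simp [Nat.add_sub_cancel]

theorem lrl_step (acc : List Int) (i : Int) (hm : i ∈ acc) :
    (if acc.contains i then (PySem.List.remove? acc i).getD acc else acc) = acc.erase i := by
  rw [if_pos (by simpa using hm), PySem.List.remove?_eq_some_erase _ _ hm]
  rfl

-- A's removal of [m, m+1, m+2] decrements the three leading counts of the encoding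
theorem remove_char (m c c1 c2 : Int) (rest2 : List (Int × Int))
    (hc : 1 ≤ c) (h1 : 1 ≤ c1) (h2 : 1 ≤ c2) :
    list_remove_list (unRLE ((m, c) :: (m + 1, c1) :: (m + 2, c2) :: rest2)) [m, m + 1, m + 2]
      = unRLE ((m, c - 1) :: (m + 1, c1 - 1) :: (m + 2, c2 - 1) :: rest2) := by
  have e0 : unRLE ((m, c) :: (m + 1, c1) :: (m + 2, c2) :: rest2)
      = List.replicate c.toNat m ++ (List.replicate c1.toNat (m + 1)
        ++ (List.replicate c2.toNat (m + 2) ++ unRLE rest2)) := by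
    simp [unRLE_cons, List.append_assoc]
  unfold list_remove_list
  simp only [List.foldl_cons, List.foldl_nil]
  rw [e0]
  rw [lrl_step _ m (by
    apply List.mem_append_left
    simp [List.mem_replicate]; omega)]
  rw [erase_head _ _ _ (by omega)]
  rw [lrl_step _ (m + 1) (by
    apply List.mem_append_right; apply List.mem_append_left
    simp [List.mem_replicate]; omega)]
  rw [erase_skip _ _ _ _ (by omega), erase_head _ _ _ (by omega)]
  rw [lrl_step _ (m + 2) (by
    apply List.mem_append_right; apply List.mem_append_right; apply List.mem_append_left
    simp [List.mem_replicate]; omega)]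
  rw [erase_skip _ _ _ _ (by omega), erase_skip _ _ _ _ (by omega),
    erase_head _ _ _ (by omega)]
  simp only [unRLE_cons, List.append_assoc]
  congr 1
  · congr 1; omega
  congr 1
  · congr 1; omega
  congr 1
  · congr 1; omega
theorem len_unRLE_cons (v c : Int) (rest : List (Int × Int)) :
    (unRLE ((v, c) :: rest)).length = c.toNat + (unRLE rest).length := by
  simp [unRLE_cons]

theorem main_bridge : ∀ (n : Nat) (s : List (Int × Int)),
    (unRLE s).length + s.length ≤ n →
    List.IsChain (fun p q : Int × Int => p.1 < q.1) s →
    (∀ p ∈ s, 0 ≤ p.2) →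
    is_all_ments (unRLE s) = solveGreedy s := by
  intro n
  induction n with
  | zero =>
    intro s hn _ _
    have hs0 : s = [] := by
      cases s with
      | nil => rfl
      | cons a t => simp at hn
    subst hs0
    rw [show unRLE [] = [] from rfl, is_all_ments, solveGreedy]
  | succ n ih =>
    intro s hn hch hcnt
    match s with
    | [] => rw [show unRLE [] = [] from rfl, is_all_ments, solveGreedy]
    | (m, c) :: rest =>
      have hc0 : 0 ≤ c := hcnt (m, c) (by simp)
      have hchr : List.IsChain (fun p q : Int × Int => p.1 < q.1) rest :=
        (List.isChain_cons.mp hch).2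
      have hcntr : ∀ p ∈ rest, 0 ≤ p.2 := fun p hp => hcnt p (by simp [hp])
      by_cases hz : c = 0
      · subst hz
        have he : unRLE ((m, (0:Int)) :: rest) = unRLE rest := by
          simp [unRLE_cons]
        rw [he, solveGreedy, if_pos (by norm_num)]
        refine ih rest ?_ hchr hcntr
        rw [len_unRLE_cons] at hn
        simp at hn ⊢
        omega
      · have hc1 : 1 ≤ c := by omega
        have hgt := keys_gt m c rest hch
        have hu : ∀ x ∈ unRLE rest, m < x := by
          intro x hx
          rw [mem_unRLE] at hx
          obtain ⟨p, hp, rfl, _⟩ := hx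
          exact hgt p hp
        have hl : unRLE ((m, c) :: rest) = List.replicate c.toNat m ++ unRLE rest :=
          unRLE_cons m c rest
        have hlc : List.replicate c.toNat m ++ unRLE rest
            = m :: (List.replicate (c.toNat - 1) m ++ unRLE rest) := by
          rw [show c.toNat = (c.toNat - 1) + 1 by omega, List.replicate_succ]
          simp
        by_cases hm3 : (c.toNat + (unRLE rest).length) % 3 = 0
        · -- length is a multiple of 3: A recurses, and we compare with the greedy step
          rw [solveGreedy_G m c rest hc1]
          rw [hl, hlc, is_all_ments, ← hlc]
          rw [if_pos (by
            simp only [beq_iff_eq, ← hlc, List.length_append, List.length_replicate]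
            omega)]
          -- triplet test
          rw [trip_char m c.toNat (unRLE rest) (by omega) (by omega) hu]
          have hdec : decide (3 ≤ c.toNat) = decide (3 ≤ c) := by
            by_cases h : (3:Int) ≤ c
            · rw [decide_eq_true h, decide_eq_true (by omega)]
            · rw [decide_eq_false h, decide_eq_false (by omega : ¬ 3 ≤ c.toNat)]
          rw [hdec]
          -- shunts
          have hsh : ((List.replicate c.toNat m ++ unRLE rest).contains (m + 1)
              && (List.replicate c.toNat m ++ unRLE rest).contains (m + 2)) = adjB m rest := by
            rw [← hl]; exact adj_char m c rest hch
          rw [hsh]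
          -- triplet branch
          have htrip : (decide (3 ≤ c) && is_all_ments ((List.replicate c.toNat m ++ unRLE rest).drop 3))
              = (decide (3 ≤ c) && solveGreedy ((m, c - 3) :: rest)) := by
            by_cases h3 : (3:Int) ≤ c
            · have hdrop : (List.replicate c.toNat m ++ unRLE rest).drop 3
                  = unRLE ((m, c - 3) :: rest) := by
                rw [List.drop_append_of_le_length (by simp; omega), List.drop_replicate]
                rw [unRLE_cons, show (c - 3).toNat = c.toNat - 3 by omega]
              rw [hdrop]
              rw [ih ((m, c - 3) :: rest) (by
                  simp only [len_unRLE_cons, List.length_cons] at hn ⊢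
                  omega)
                (by
                  rw [List.isChain_cons] at hch ⊢
                  exact ⟨hch.1, hchr⟩)
                (by
                  intro p hp
                  rcases List.mem_cons.mp hp with rfl | hp
                  · simp; omega
                  · exact hcntr p hp)]
            · rw [decide_eq_false h3, Bool.false_and, Bool.false_and]
          rw [htrip]
          -- run branch
          match rest with
          | [] => rw [show adjB m [] = false from rfl]; simp
          | [(v1, c1)] => rw [show adjB m [(v1, c1)] = false from rfl]; simp
          | (v1, c1) :: (v2, c2) :: rest2 =>
            by_cases hadj : v1 = m + 1 ∧ v2 = m + 2 ∧ 1 ≤ c1 ∧ 1 ≤ c2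
            · obtain ⟨ha1, ha2, hb1, hb2⟩ := hadj
              subst ha1; subst ha2
              have hab : adjB m ((m + 1, c1) :: (m + 2, c2) :: rest2) = true := by
                simp only [adjB, decide_eq_true_eq]; simp [hb1, hb2]
              simp only [hab, Bool.true_and]
              rw [← hl, remove_char m c c1 c2 rest2 hc1 hb1 hb2]
              rw [ih ((m, c - 1) :: (m + 1, c1 - 1) :: (m + 2, c2 - 1) :: rest2)
                (by
                  simp only [len_unRLE_cons, List.length_cons] at hn ⊢
                  omega)
                (by
                  obtain ⟨_, hch2⟩ := List.isChain_cons.mp hch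
                  obtain ⟨_, hch3⟩ := List.isChain_cons.mp hch2
                  obtain ⟨hh3, hch4⟩ := List.isChain_cons.mp hch3
                  refine List.isChain_cons.mpr ⟨?_, List.isChain_cons.mpr ⟨?_,
                    List.isChain_cons.mpr ⟨hh3, hch4⟩⟩⟩
                  · intro b hb; simp at hb; subst hb; simp
                  · intro b hb; simp at hb; subst hb; simp)
                (by
                  intro p hp
                  simp only [List.mem_cons] at hp
                  rcases hp with rfl | rfl | rfl | hp
                  · simp; omega
                  · simp; omega
                  · simp; omega
                  · exact hcntr p (by simp [hp]))]
              rfl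
            · have hab : adjB m ((v1, c1) :: (v2, c2) :: rest2) = false := by
                simp only [adjB, decide_eq_false_iff_not]; exact hadj
              simp only [hab, Bool.false_and, Bool.or_false]
        · -- length not a multiple of 3: A answers False, and greedy cannot succeed
          rw [hl, hlc, is_all_ments, ← hlc]
          rw [if_neg (by
            simp only [beq_iff_eq, ← hlc, List.length_append, List.length_replicate]
            omega)]
          cases hsv : solveGreedy ((m, c) :: rest) with
          | false => rfl
          | true =>
            exfalso
            have := solveGreedy_total ((m, c) :: rest).length ((m, c) :: rest) le_rfl hcnt hsv
            rw [len_unRLE_cons] at this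
            exact hm3 this

-- ===== VERDICT (by name: the statement is the Claim_ definition above) =====
theorem is_all_ments_spec : Claim_equal_is_all_ments := by
  intro l _ hpre
  unfold Spec_is_all_ments is_all_ments_alt
  by_cases h3 : l.length % 3 = 0
  · have hsorted : l.Pairwise (· ≤ ·) := hpre.resolve_right (by simpa using h3)
    obtain ⟨hcnt, hch, hun⟩ := toRLE_facts l hsorted
    have hM := main_bridge ((unRLE (toRLE l)).length + (toRLE l).length) (toRLE l) le_rfl
      hch (fun p hp => le_trans zero_le_one (hcnt p hp))
    rw [hun] at hM
    simp [h3, hM]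
  · rw [if_neg (by simpa using h3)]
    cases l with
    | nil => simp at h3
    | cons x t => rw [is_all_ments, if_neg (by simpa using h3)]
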